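/- GENERATED by mk_final_copies.py from the proof of the farm's unit `inverse_mdct.12` (farm:inverse_mdct.12.2: Proof.lean) as the
   re-elaboration sweep compiled it — do not edit. -/
import Asan.CheckWalk
import Vorbis.Spec.MdctUse
import Vorbis.Spec.Units.inverse_mdct_12

open X86 X86.User Asan Vorbis Vorbis.Spec

set_option maxRecDepth 4000
set_option maxHeartbeats 4000000

namespace Vorbis.Spec.inverse_mdct_12

/-- Two little-endian reads of `n` bytes that agree as numbers agree byte by byte (the converse of `Mem.readLE_congr`): how a
field that was overwritten with its old value (`temp_offset`) reads the same bytes again. -/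
theorem read_of_readLE_eq (μ ν : Mem) (n : Nat) (a : Word) (h : ν.readLE a n = μ.readLE a n) (i : Nat) (hi : i < n) :
    ν.read (a + UInt64.ofNat i) = μ.read (a + UInt64.ofNat i) := by
  induction n generalizing a i with
  | zero => exact absurd hi (Nat.not_lt_zero i)
  | succ n ih =>
    simp only [Mem.readLE] at h
    have h1 := (ν.read a).toNat_lt
    have h2 := (μ.read a).toNat_lt
    have hhead : (ν.read a).toNat = (μ.read a).toNat := by omega
    have htail : ν.readLE (a + 1) n = μ.readLE (a + 1) n := by omega
    cases i with
    | zero =>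
      simp only [UInt64.reduceOfNat, UInt64.add_zero]
      exact UInt8.toNat_inj.mp hhead
    | succ j =>
      rw [← Mem.add_ofNat_succ]
      exact ih (a + 1) htail j (by omega)

/-- **An `int` field that holds the same non-negative value in two memories reads the same four bytes** (`temp_offset` after
`temp_alloc_restore(f, save_point)`: written twice, final value = initial). -/
theorem eqOn_of_i32_eq (μ ν : Mem) (a : Nat) (x : Nat) (ha : a + 4 ≤ 2 ^ 64) (h1 : μ.i32 a = (x : Int)) (h2 : ν.i32 a = (x : Int)) :
    Mem.EqOn a (a + 4) μ ν := by
  have e : ν.readLE (addr a) 4 = μ.readLE (addr a) 4 := by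
    have c1 := sint32_cases (μ.u32 a)
    have c2 := sint32_cases (ν.u32 a)
    have l1 := Mem.u32_lt μ a
    have l2 := Mem.u32_lt ν a
    rw [Mem.i32_def] at h1 h2
    show ν.u32 a = μ.u32 a
    omega
  intro w hw1 hw2
  have hw : w = addr a + UInt64.ofNat (w.toNat - a) := by
    apply UInt64.toNat_inj.mp
    unfold addr
    rw [UInt64.toNat_add, UInt64.toNat_ofNat', UInt64.toNat_ofNat']
    omega
  rw [hw]
  exact read_of_readLE_eq μ ν 4 (addr a) e (w.toNat - a) (by omega)

/-- **The shared part of inverse_mdct's assertions reads the memory, rbp and rsp only**: it holds again at a state `w` with the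
memory of `v` and the same rbp and rsp (the step-8 loop test `mov rax, [rbp−68H] ; cmp rbx, rax ; jae` writes rax, RIP and the
status flags). -/
theorem body_of_mem_eq {u₀ : State} {others : List Obj} {frames : List (Nat × FrameLayout)} {len : Nat} {A : Arena}
    {stored room : Int} {ysz : Nat → Nat} {k c : Nat} {ue : State} {ret : Word} {v w : State}
    (hb : inverse_mdct.Body u₀ others frames len A stored room ysz k c ue ret v) (hmem : w.mem = v.mem)
    (hrbp : w.reg .rbp = v.reg .rbp) (hrsp : w.reg .rsp = v.reg .rsp) (habi : abiInv w) :
    inverse_mdct.Body u₀ others frames len A stored room ysz k c ue ret w :=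
  { entry := hb.entry
    pre := hb.pre
    code := hmem ▸ hb.code
    abi := habi
    rbp := hrbp.trans hb.rbp
    rsp := hrsp.trans hb.rsp
    retSlot := hmem ▸ hb.retSlot
    rbpSlot := hmem ▸ hb.rbpSlot
    r15Slot := hmem ▸ hb.r15Slot
    r14Slot := hmem ▸ hb.r14Slot
    r13Slot := hmem ▸ hb.r13Slot
    r12Slot := hmem ▸ hb.r12Slot
    rbxSlot := hmem ▸ hb.rbxSlot
    same := hmem ▸ hb.same
    busy := hmem ▸ hb.busy
    shadow := hmem ▸ hb.shadow
    fSlot := hmem ▸ hb.fSlot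
    btSlot := hmem ▸ hb.btSlot
    saveSlot := hmem ▸ hb.saveSlot
    vSlot := hmem ▸ hb.vSlot }

/-- **The invariant of the step-8 loop reads the memory and rbp rsp rbx r12 r13 r14 r15 only**: it holds again after the loop
test at `loop10`, which writes rax, RIP and the status flags. -/
theorem s8Loop_of_mem_eq {u₀ : State} {others : List Obj} {frames : List (Nat × FrameLayout)} {len : Nat} {A : Arena}
    {stored room : Int} {ysz : Nat → Nat} {k c : Nat} {ue : State} {ret : Word} {t : Nat} {v w : State}
    (h : inverse_mdct.S8Loop u₀ others frames len A stored room ysz k c ue ret t v) (hmem : w.mem = v.mem)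
    (hk : RegsKept [.rax] v w) (habi : abiInv w) :
    inverse_mdct.S8Loop u₀ others frames len A stored room ysz k c ue ret t w :=
  { body := body_of_mem_eq h.body hmem (hk .rbp rfl) (hk .rsp rfl) habi
    le := h.le
    rbx := (hk .rbx rfl) ▸ h.rbx
    r12 := (hk .r12 rfl) ▸ h.r12
    d0Slot := hmem ▸ h.d0Slot
    r13 := (hk .r13 rfl) ▸ h.r13
    r15 := (hk .r15 rfl) ▸ h.r15
    r14 := (hk .r14 rfl) ▸ h.r14 }

end Vorbis.Spec.inverse_mdct_12

/-- Segment 12 of `inverse_mdct` (`loop10` 0x10a164 … `ret` 0x10a18e; C 2910, 2955–2956): from the invariant of the step-8 loop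
at its head (`AtS8Head`), either into the body at `cut22` with `t < n16` (`AtS8Body`: nothing changed but rax, RIP and the status
flags), or through `arena_temp_restore(f, save_point = L)` and the epilogue (`lea rsp, [rbp−28H]`, six pops) to the state after
the `ret`: the contract's `Returned`. The callee releases the ONE outstanding temp block (`dead = [(T', 2n)]`, `keep = []`), so
the live list is the entry's again (`dropObjs_cons_self`); `temp_offset` holds `T = L` again, hence `*f` reads byte for byte as
at the entry (`eqOn_of_i32_eq`), and ADO for the entry's ghost arena follows by `ADO.frame`. -/
theorem Vorbis.Spec.Worked.inverse_mdct_12_ok : Vorbis.Spec.inverse_mdct_12.Statement := by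
  intro Lay hLay μ hμ u₀ hcode h_restore others frames len A stored room ysz k c ue ret t v hat
  -- 1. the entry assertion: the loop invariant `S8Loop` with its shared part `Body`; the ENTRY state's facts (about `ue`)
  obtain ⟨hrip, hloop⟩ := hat
  have hb := hloop.body
  have hp := hb.pre
  have he := hb.entry
  v_entry he
  -- 2. the PRESENT state's facts (`v.reg r = …` under names that are not the walker's `w_<reg>`: it clears those)
  have w_rip := hrip
  have hv_rsp := hb.rsp
  have hv_rbp := hb.rbp
  have w_eq : Mem.EqOn Vorbis.L.textLo Vorbis.L.textHi u₀.mem v.mem := hb.code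
  have hdf : v.flags .df = false := (show abiInv _ from hb.abi).1
  have hmx : v.mxcsr &&& 0x1F80 = 0x1F80 := (show abiInv _ from hb.abi).2
  have hsse := Vorbis.sseOK_of_abiInv hb.abi
  -- 3. the stack slots the segment loads: the return address, the six saved registers, `f`, `save_point`, `v`
  have s0 := hb.retSlot
  have s1 := hb.rbpSlot
  have s2 := hb.r15Slot
  have s3 := hb.r14Slot
  have s4 := hb.r13Slot
  have s5 := hb.r12Slot
  have s6 := hb.rbxSlot
  have sf := hb.fSlot
  have ssave := hb.saveSlot
  have sv := hb.vSlot
  -- the callee's contract for the busy arena: the one outstanding block is released, none is kept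
  have hrest := h_restore (A.newTempObj (2 * inverse_mdct.n ue) :: others) frames (A.pushTemp (2 * inverse_mdct.n ue))
    [((A.pushTemp (2 * inverse_mdct.n ue)).T, 2 * inverse_mdct.n ue)] []
  -- where the temp block, the arena and `*f` are: arithmetic facts for `u_omega` / `u_frame`
  have hr := hp.tmp_range
  have hAR1 := hp.ado.ok.AR1
  have hAR2 := hp.ado.ok.AR2
  have hobin := hp.ok.inside _ hp.ob1
  have hoS := hp.offStack _ hp.ob1
  simp only [vblock, voff] at hobin hoS
  have hf64 : inverse_mdct.f ue + Off.sizeof.stb_vorbis ≤ 2 ^ 64 := by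
    simp only [voff]
    omega
  -- 0x10a164 `loop10` (C 2910 `while (e >= v)`): the loop test, and on the exit path the call of arena_temp_restore (C 2955)
  u_walk hcode [hμ.vendor] until [Vorbis.L.inverse_mdct.cut22] span [Vorbis.L.textLo, Vorbis.L.textHi] side (v_side)
  case call_inv =>
    v_inv
  case pre_10a17b =>
    -- 0x10a17b `call arena_temp_restore`: `ArenaPre` for the busy arena, `temps = dead ++ []`, `TempChain T' dead L`
    have hun : ShadowUntouched v.mem s_10a17b.mem := by v_untouched
    have hobj : (Vorbis.Block.mk (inverse_mdct.f ue) Off.sizeof.stb_vorbis).Same v.mem s_10a17b.mem := by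
      simp only [vblock, voff]
      rw [w_mem]
      u_memnorm
      u_eqon
    have hrsp8 : (s_10a17b.reg .rsp).toNat + 8 = (ue.reg .rsp).toNat - 184 := by
      rw [w_rsp]
      u_omega
    have hrdi : (s_10a17b.reg .rdi).toNat = inverse_mdct.f ue := by
      rw [w_rdi, inverse_mdct.f_def]
    have hrsi : (s_10a17b.reg .rsi).toNat % 2 ^ 32 = A.L := by
      rw [w_rsi, Vorbis.toNat_ofBV32, BitVec.toNat_ofNat]
      omega
    have h4 := hb.busy.ok.AR4
    rw [hb.busy.one] at h4
    -- `*f` is a setup block of the arena, of the busy arena too: it ends below the temp stack (contracts v2, last clause)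
    have hblk : (A.pushTemp (2 * inverse_mdct.n ue)).Block (inverse_mdct.f ue) 1808 :=
      hp.inv.obj.mono (A.extends_pushTemp (2 * inverse_mdct.n ue))
    refine ⟨⟨⟨?_, ?_⟩, ?_, ?_, ?_⟩, ?_, ?_, ?_⟩
    · -- the shadow layer: the clean stack ends at the slot of the return address just pushed
      rw [hrsp8]
      exact hb.shadow.untouched hun
    · -- no live object lies in the text: the temp block is inside the arena, which is above the text
      intro o ho
      rcases List.mem_cons.mp ho with rfl | ho
      · have htext := hp.arenaText
        show Vorbis.L.textHi ≤ A.B + (A.T - (r8 (2 * inverse_mdct.n ue) + 32))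
        omega
      · exact hp.shadow.offText o ho
    · -- OB1: `*f` is live
      rw [hrdi]
      exact hp.inv.hand.objLive.cons _
    · -- ArenaOK: the pushed return address is off `*f`
      rw [hrdi]
      exact hb.busy.ok.frame_obj hf64 hobj
    · exact hp.arenaText
    · -- the one outstanding block is released
      rw [hb.busy.one]
      rfl
    · rw [hrsi]
      exact h4
    · -- `*f` does not meet the released range `[B + T', B + L)`
      rw [hrdi]
      exact arena_temp_restore.apart_of_block hb.busy.ok hblk _
  · -- 0x10a16b `jae` taken (C 2910: `e >= v`): into the body at `cut22`, nothing changed but rax, RIP and the status flags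
    have hlt : t < inverse_mdct.n ue / 16 := by
      have h1 := hloop.rbx
      have h2 := hloop.le
      u_omega
    have habi : abiInv s_10a16b := by v_inv
    have hloop' := Vorbis.Spec.inverse_mdct_12.s8Loop_of_mem_eq hloop w_mem w_kept habi
    exact ReachVia.done (Or.inl ⟨w_rip, hloop', hlt⟩)
  · -- 0x10a16b `jae` not taken: the temp block is released (C 2955), then the epilogue (C 2956)
    v_after_call w_rsp_10a17b w_mem_10a17b
    -- the callee's windows in this function's words: `temp_offset`, the shadow of `[v, ARENA_B + T)`
    have hrsi : (s_10a17b.reg .rsi).toNat % 2 ^ 32 = A.T := by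
      rw [w_rsi_10a17b, Vorbis.toNat_ofBV32, BitVec.toNat_ofNat]
      omega
    have e1 : (A.pushTemp (2 * ((ue.reg .rsi).toNat % 2 ^ 32))).B + (A.pushTemp (2 * ((ue.reg .rsi).toNat % 2 ^ 32))).T =
        inverse_mdct.tmp A ue := by
      rw [inverse_mdct.tmp_def]
      rfl
    have e2 : inverse_mdct.tmp A ue + (A.T - (A.pushTemp (2 * ((ue.reg .rsi).toNat % 2 ^ 32))).T) = A.B + A.T := by
      have e3 := e1
      simp only [varena] at e3 ⊢
      omega
    have e4 : (s_10a17b.reg .rdi).toNat = inverse_mdct.f ue := by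
      rw [w_rdi_10a17b, inverse_mdct.f_def]
    rw [hrsi, e1, e2, e4] at w_same
    unfold shadowSpan at w_same
    clear e1 e2 e4 hrsi
    -- the return address and the six saved registers, read through the callee's footprint
    have hs0 : UInt64.ofNat (s_10a17br.mem.readLE (ue.reg .rsp) 8) = ret := by
      u_frame s0
    have hs1 : UInt64.ofNat (s_10a17br.mem.readLE (ue.reg .rsp - 8) 8) = ue.reg .rbp := by
      u_frame s1
    have hs2 : UInt64.ofNat (s_10a17br.mem.readLE (ue.reg .rsp - 16) 8) = ue.reg .r15 := by
      u_frame s2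
    have hs3 : UInt64.ofNat (s_10a17br.mem.readLE (ue.reg .rsp - 24) 8) = ue.reg .r14 := by
      u_frame s3
    have hs4 : UInt64.ofNat (s_10a17br.mem.readLE (ue.reg .rsp - 32) 8) = ue.reg .r13 := by
      u_frame s4
    have hs5 : UInt64.ofNat (s_10a17br.mem.readLE (ue.reg .rsp - 40) 8) = ue.reg .r12 := by
      u_frame s5
    have hs6 : UInt64.ofNat (s_10a17br.mem.readLE (ue.reg .rsp - 48) 8) = ue.reg .rbx := by
      u_frame s6
    u_walk hcode [hμ.vendor] span [Vorbis.L.textLo, Vorbis.L.textHi] side (v_side)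
    -- 0x10a18e `ret`: the contract's `Returned`
    -- what was written since the cut: the callee's return address and frame, `temp_offset`, the shadow of `[v, ARENA_B + T)`
    have hsr : Mem.SameExcept
        [⟨(ue.reg .rsp).toNat - 368, (ue.reg .rsp).toNat⟩,
         ⟨inverse_mdct.f ue + 132, inverse_mdct.f ue + 136⟩,
         ⟨0xC00000 + inverse_mdct.tmp A ue / 8, 0xC00000 + (A.B + A.T + 7) / 8⟩] v.mem s_10a17br.mem := by
      u_same
    -- … all inside the contract's footprint
    have hfoot : Mem.SameExcept ((inverse_mdct.spec others frames len A stored room ysz k c).footprint ue) ue.mem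
        s_10a17br.mem := by
      apply hb.same.trans
      apply hsr.mono
      intro x hx a ha1 ha2
      unfold Spec.footprint
      simp only [inverse_mdct.spec_frame, inverse_mdct.spec_writes]
      simp only [List.mem_cons, List.mem_nil_iff, or_false] at hx
      rcases hx with rfl | rfl | rfl
      · exact ⟨_, List.mem_cons_self, ha1, ha2⟩
      · exact ⟨_, List.mem_cons_of_mem _ (List.mem_cons_of_mem _ (List.mem_cons_of_mem _ List.mem_cons_self)), ha1, ha2⟩
      · exact ⟨_, List.mem_cons_of_mem _ (List.mem_cons_of_mem _ (List.mem_cons_of_mem _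
          (List.mem_cons_of_mem _ List.mem_cons_self))), ha1, ha2⟩
    -- the callee's post: ArenaOK and the shadow layer without the released block
    obtain ⟨hok, hshr⟩ := w_post
    have hrsi : (s_10a17b.reg .rsi).toNat % 2 ^ 32 = A.T := by
      rw [w_rsi_10a17b, Vorbis.toNat_ofBV32, BitVec.toNat_ofNat]
      omega
    have hrdi : (s_10a17b.reg .rdi).toNat = inverse_mdct.f ue := by
      rw [w_rdi_10a17b, inverse_mdct.f_def]
    -- the live list is the entry's again: the temp block was a NEW object
    have hdrop : dropObjs ([((A.pushTemp (2 * inverse_mdct.n ue)).T, 2 * inverse_mdct.n ue)].map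
        (A.pushTemp (2 * inverse_mdct.n ue)).tempObj) (A.newTempObj (2 * inverse_mdct.n ue) :: others) = others := by
      have h8 : r8 (2 * inverse_mdct.n ue) ≤ stb_vorbis.temp_memory_required ue.mem (inverse_mdct.f ue) :=
        r8_le_of_le hp.t3 hp.ado.tmr8
      have hfit := (temp_alloc_ok hp.ado h8).1
      exact dropObjs_cons_self (hp.ado.ok.newTemp_not_mem (2 * inverse_mdct.n ue) hfit)
    rw [hdrop] at hok hshr
    -- `*f` reads exactly as at the entry: `temp_offset` holds `T = L` again, nothing else of it is in the footprint
    have hobjSame : (objBlock (inverse_mdct.f ue)).Same ue.mem s_10a17br.mem := by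
      have hoB := hp.obj_off_buf
      have hoT := hp.blk_off_tmp hp.ob1
      have hnle := hp.n_le
      have ht0 := hp.ado.ok.AR5.temp
      have ht1 := hok.AR5.temp
      rw [hrdi, hrsi] at ht1
      simp only [varena] at ht1
      simp only [vacc, voff] at ht0 ht1
      simp only [vblock, voff] at hoT ⊢
      have hmid := Vorbis.Spec.inverse_mdct_12.eqOn_of_i32_eq ue.mem s_10a17br.mem (inverse_mdct.f ue + 132) A.T (by omega) ht0 ht1
      have hlo : Mem.EqOn (inverse_mdct.f ue) (inverse_mdct.f ue + 132) ue.mem s_10a17br.mem := by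
        apply hfoot.eqOn
        intro x hx
        unfold Spec.footprint at hx
        simp only [inverse_mdct.spec_frame, inverse_mdct.spec_writes, List.mem_cons, List.mem_nil_iff, or_false] at hx
        unfold shadowSpan at hx
        rcases hx with rfl | rfl | rfl | rfl | rfl <;> simp only [] <;> omega
      have hhi : Mem.EqOn (inverse_mdct.f ue + 136) (inverse_mdct.f ue + 1808) ue.mem s_10a17br.mem := by
        apply hfoot.eqOn
        intro x hx
        unfold Spec.footprint at hx
        simp only [inverse_mdct.spec_frame, inverse_mdct.spec_writes, List.mem_cons, List.mem_nil_iff, or_false] at hx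
        unfold shadowSpan at hx
        rcases hx with rfl | rfl | rfl | rfl | rfl <;> simp only [] <;> omega
      intro w hw1 hw2
      by_cases c1 : w.toNat < inverse_mdct.f ue + 132
      · exact hlo w hw1 c1
      · by_cases c2 : w.toNat < inverse_mdct.f ue + 136
        · exact hmid w (by omega) c2
        · exact hhi w (by omega) hw2
    refine ReachVia.done (Or.inr ?_)
    refine X86.User.Returned.mk w_rip w_rsp ?r_saved ?r_same (Vorbis.conv_code_in w_eq) ?r_inv ?r_post
    case r_saved =>
      -- rbx, r12 – r15 and rbp were popped back
      intro r hr
      cases r <;> first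
        | exact absurd hr (by decide)
        | (with_reducible assumption)
    case r_same =>
      rw [w_mem]
      exact hfoot
    case r_inv =>
      refine Vorbis.abiInv_of ?_ ?_
      · rw [w_flags]
        exact w_df
      · rw [w_mxcsr]
        exact w_mx
    case r_post =>
      show ShadowInv others frames ((ue.reg .rsp).toNat + 8) s_10a18e.mem ∧
        ADO A others s_10a18e.mem (inverse_mdct.f ue) ∧ (objBlock (inverse_mdct.f ue)).Same ue.mem s_10a18e.mem
      rw [w_mem]
      refine ⟨?_, ?_, hobjSame⟩
      · -- the shadow layer for the entry's objects; the clean stack ends above the popped return address again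
        have hact := hp.shadow.inv.stack.active
        refine hshr.raise ?_ ?_ ?_ ?_
        · rw [w_rsp_10a17b]
          u_omega
        · omega
        · omega
        · intro bF hbF
          exact (hact bF hbF).2.2.1
      · -- ADO again, for the entry's ghost arena: it reads `*f` only
        exact hp.ado.frame hf64 hobjSame
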